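-- pv_equiv track=rewrite | github.com/jakewhlr/advent-of-code | y2023/d03/gear_ratios/schematic.py | condense_numbers
-- ===== SOURCE A (Python) =====
-- def condense_numbers(schematic_line: list[str]) -> list[str]:
--     new_line = []
--     line_iter = enumerate(schematic_line)
--     number_indexes = []
--     for index, item in line_iter:
--         if len(number_indexes) > 1:
--             number_indexes.pop()
--             continue
--         number_indexes = []
--         if item.isnumeric():
--             new_index = index
--             digits = []
--             while new_index < len(schematic_line):
--                 if schematic_line[new_index].isnumeric():
--                     digits.append(schematic_line[new_index])
--                     number_indexes.append(new_index)
--                 else: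
--                     break
--                 new_index += 1
--             for i in number_indexes:
--                 new_line.append(f"{''.join(digits)}")
--         else:
--             new_line.append(item)
--     return new_line
-- ===== SOURCE B (Python) =====
-- from itertools import groupby
--
-- def condense_numbers(schematic_line: list[str]) -> list[str]:
--     new_line = []
--     for is_num, run in groupby(schematic_line, key=lambda t: t.isnumeric()):
--         run = list(run)
--         if is_num:
--             num = ''.join(run)
--             new_line.extend([num] * len(run))
--         else:
--             new_line.extend(run)
--     return new_line
-- ===== Notes on version B (the rewrite author's own statement) =====
-- stated objective: idiomatic
-- what changed: Replaces A's enumerate loop with pop/skip index bookkeeping and an inner re-scanning while-loop by a single itertools.groupby pass over maximal numeric/non-numeric runs.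
import Mathlib
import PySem

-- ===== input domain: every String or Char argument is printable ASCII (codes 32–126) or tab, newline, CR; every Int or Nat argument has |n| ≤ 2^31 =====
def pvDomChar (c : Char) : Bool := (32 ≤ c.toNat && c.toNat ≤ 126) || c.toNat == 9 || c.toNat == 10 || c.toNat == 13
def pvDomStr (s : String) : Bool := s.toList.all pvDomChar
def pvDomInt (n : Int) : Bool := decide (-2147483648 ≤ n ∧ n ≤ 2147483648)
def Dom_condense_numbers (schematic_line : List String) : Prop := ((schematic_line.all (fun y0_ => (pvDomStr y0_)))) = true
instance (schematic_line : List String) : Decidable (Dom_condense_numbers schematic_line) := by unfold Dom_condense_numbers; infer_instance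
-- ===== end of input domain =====

-- B replaces A's index/pop skip machinery by explicit grouping into maximal runs (itertools.groupby); objective: simpler.
-- str.isnumeric is ported as PySem.Str.strIsdigit (= str.isdigit), exact on the ASCII domain Dom_condense_numbers.

-- ===== PORT A =====
-- enumerate(schematic_line), indices carried explicitly
def pvEnumFrom (j : Nat) : List String → List (Nat × String)
  | [] => []
  | x :: xs => (j, x) :: pvEnumFrom (j + 1) xs

-- the inner while loop: scan forward from absolute index j collecting digits and their indexes
def pvScanRun (ln : List String) (j : Nat) : List String × List Nat :=
  if h : j < ln.length then
    if PySem.Str.strIsdigit (ln[j]) then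
      let p := pvScanRun ln (j + 1)
      ((ln[j]) :: p.1, j :: p.2)
    else ([], [])
  else ([], [])
termination_by ln.length - j

-- one iteration of A's for-loop over enumerate: state = (new_line, number_indexes)
def pvStepA (ln : List String) (st : List String × List Nat) (e : Nat × String) :
    List String × List Nat :=
  if st.2.length > 1 then (st.1, st.2.dropLast)          -- number_indexes.pop(); continue
  else
    if PySem.Str.strIsdigit e.2 then
      let p := pvScanRun ln e.1
      (p.2.foldl (fun nl _ => nl ++ [PySem.Str.join "" p.1]) st.1, p.2)
    else (st.1 ++ [e.2], [])

def condense_numbers (schematic_line : List String) : List String :=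
  ((pvEnumFrom 0 schematic_line).foldl (pvStepA schematic_line) ([], [])).1

-- ===== PORT B =====
-- groupby(schematic_line, key=isnumeric): peel off one maximal run at a time
def condense_numbers_alt : List String → List String
  | [] => []
  | x :: xs =>
    let k := PySem.Str.strIsdigit x
    let run := x :: xs.takeWhile (fun y => PySem.Str.strIsdigit y == k)
    let rest := xs.dropWhile (fun y => PySem.Str.strIsdigit y == k)
    (if k then List.replicate run.length (PySem.Str.join "" run) else run) ++
      condense_numbers_alt rest
termination_by l => l.length
decreasing_by
  have := List.length_dropWhile_le (fun y => PySem.Str.strIsdigit y == PySem.Str.strIsdigit x) xs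
  simp_all

-- ===== PRECONDITION & SPEC =====
def Spec_condense_numbers (schematic_line : List String) (out : List String) : Prop := out = condense_numbers_alt schematic_line
instance (schematic_line : List String) (out : List String) : Decidable (Spec_condense_numbers schematic_line out) := by unfold Spec_condense_numbers; infer_instance

-- ===== CLAIM (what is proved, stated in full; the proofs are below) =====
def Claim_equal_condense_numbers : Prop := ∀ (schematic_line : List String), Dom_condense_numbers schematic_line → Spec_condense_numbers schematic_line (condense_numbers schematic_line)

-- ===== LEMMAS AND PROOFS =====

theorem pv_alt_nil : condense_numbers_alt [] = [] := by
  rw [condense_numbers_alt]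

theorem pv_alt_cons (x : String) (xs : List String) :
    condense_numbers_alt (x :: xs) =
      (if PySem.Str.strIsdigit x then
          List.replicate
            (x :: xs.takeWhile (fun y => PySem.Str.strIsdigit y == PySem.Str.strIsdigit x)).length
            (PySem.Str.join ""
              (x :: xs.takeWhile (fun y => PySem.Str.strIsdigit y == PySem.Str.strIsdigit x)))
        else x :: xs.takeWhile (fun y => PySem.Str.strIsdigit y == PySem.Str.strIsdigit x)) ++
        condense_numbers_alt
          (xs.dropWhile (fun y => PySem.Str.strIsdigit y == PySem.Str.strIsdigit x)) := by
  rw [condense_numbers_alt]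

theorem pv_dropWhile_eq_drop {α : Type} (p : α → Bool) (l : List α) :
    l.dropWhile p = l.drop (l.takeWhile p).length := by
  have h := List.takeWhile_append_dropWhile (p := p) (l := l)
  calc l.dropWhile p
      = (l.takeWhile p ++ l.dropWhile p).drop (l.takeWhile p).length := by rw [List.drop_left]
    _ = l.drop (l.takeWhile p).length := by rw [h]

theorem pvScanRun_eq (ln : List String) (j : Nat) :
    pvScanRun ln j =
      ((ln.drop j).takeWhile PySem.Str.strIsdigit,
       List.range' j ((ln.drop j).takeWhile PySem.Str.strIsdigit).length) := by
  rw [pvScanRun]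
  by_cases h : j < ln.length
  · by_cases hdig : PySem.Str.strIsdigit (ln[j])
    · rw [dif_pos h, if_pos hdig, pvScanRun_eq ln (j + 1), List.drop_eq_getElem_cons h,
        List.takeWhile_cons, if_pos hdig]
      simp [List.range'_succ]
    · rw [dif_pos h, if_neg hdig, List.drop_eq_getElem_cons h, List.takeWhile_cons,
        if_neg hdig]
      simp
  · have hnil : ln.drop j = [] := List.drop_eq_nil_of_le (by omega)
    rw [dif_neg h, hnil]
    simp
termination_by ln.length - j

theorem pvStepA_short (ln : List String) (acc : List String) (idxs : List Nat)
    (h : idxs.length ≤ 1) (e : Nat × String) :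
    pvStepA ln (acc, idxs) e = pvStepA ln (acc, []) e := by
  simp [pvStepA]
  omega

theorem pv_skip (ln : List String) (n : Nat) :
    ∀ (es : List (Nat × String)) (acc : List String) (idxs : List Nat),
      idxs.length = n + 1 →
      (es.foldl (pvStepA ln) (acc, idxs)).1
        = ((es.drop n).foldl (pvStepA ln) (acc, [])).1 := by
  induction n with
  | zero =>
    intro es acc idxs hlen
    cases es with
    | nil => simp
    | cons e es' =>
      rw [List.foldl_cons, pvStepA_short ln acc idxs (by omega) e]
      simp
  | succ n ih =>
    intro es acc idxs hlen
    cases es with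
    | nil => simp
    | cons e es' =>
      have hstep : pvStepA ln (acc, idxs) e = (acc, idxs.dropLast) := by
        simp only [pvStepA]
        rw [if_pos (by simp; omega)]
      rw [List.foldl_cons, hstep, ih es' acc idxs.dropLast (by simp [List.length_dropLast]; omega)]
      simp

theorem pvEnumFrom_drop (j m : Nat) (xs : List String) :
    (pvEnumFrom j xs).drop m = pvEnumFrom (j + m) (xs.drop m) := by
  induction xs generalizing j m with
  | nil => simp [pvEnumFrom]
  | cons x xs ih =>
    cases m with
    | zero => simp
    | succ m =>
      simp only [pvEnumFrom, List.drop_succ_cons, ih (j + 1) m]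
      congr 1
      omega

theorem pv_alt_nondigit_aux (xs : List String) :
    condense_numbers_alt xs
      = xs.takeWhile (fun y => PySem.Str.strIsdigit y == false)
        ++ condense_numbers_alt (xs.dropWhile (fun y => PySem.Str.strIsdigit y == false)) := by
  cases xs with
  | nil => simp [pv_alt_nil]
  | cons y ys =>
    by_cases hy : PySem.Str.strIsdigit y
    · have hy' : PySem.Chars.strIsdigit y.toList = true := by
        rw [← PySem.Str.strIsdigit_eq]; exact hy
      simp [hy']
    · simp only [Bool.not_eq_true] at hy
      have hy' : PySem.Chars.strIsdigit y.toList = false := by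
        rw [← PySem.Str.strIsdigit_eq]; exact hy
      rw [pv_alt_cons, if_neg (by simp [hy']), hy]
      simp [hy']

theorem pv_alt_cons_nondigit (x : String) (xs : List String)
    (hx : PySem.Str.strIsdigit x = false) :
    condense_numbers_alt (x :: xs) = x :: condense_numbers_alt xs := by
  have hx' : PySem.Chars.strIsdigit x.toList = false := by
    rw [← PySem.Str.strIsdigit_eq]; exact hx
  rw [pv_alt_cons, if_neg (by simp [hx']), hx]
  rw [pv_alt_nondigit_aux xs]
  simp

theorem pv_main (ln : List String) (n : Nat) :
    ∀ (j : Nat) (acc : List String), ln.length - j ≤ n →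
    ((pvEnumFrom j (ln.drop j)).foldl (pvStepA ln) (acc, [])).1
      = acc ++ condense_numbers_alt (ln.drop j) := by
  induction n with
  | zero =>
    intro j acc hn
    have hnil : ln.drop j = [] := List.drop_eq_nil_of_le (by omega)
    rw [hnil, pv_alt_nil]
    simp [pvEnumFrom]
  | succ n ih =>
    intro j acc hn
    cases hd : ln.drop j with
    | nil =>
      rw [pv_alt_nil]
      simp [pvEnumFrom]
    | cons x rest =>
      have hj : j < ln.length := by
        by_contra h
        rw [List.drop_eq_nil_of_le (by omega)] at hd
        exact absurd hd (by simp)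
      have hcons := (List.drop_eq_getElem_cons hj).symm.trans hd
      have hx : ln[j] = x := (List.cons.injEq _ _ _ _ ▸ hcons).1
      have hrest : ln.drop (j + 1) = rest := (List.cons.injEq _ _ _ _ ▸ hcons).2
      rw [pvEnumFrom, List.foldl_cons]
      by_cases hdig : PySem.Str.strIsdigit x
      · -- a digit run of length k ≥ 1 starting at position j
        have hscan := pvScanRun_eq ln j
        rw [hd] at hscan
        set digits := (x :: rest).takeWhile PySem.Str.strIsdigit with hdigits
        set k := digits.length with hk
        have hk1 : 1 ≤ k := by
          rw [hk, hdigits, List.takeWhile_cons, if_pos hdig]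
          simp
        have hstep : pvStepA ln (acc, []) (j, x)
            = (acc ++ List.replicate k (PySem.Str.join "" digits), List.range' j k) := by
          simp only [pvStepA, List.length_nil]
          rw [if_neg (by simp), if_pos hdig, hscan]
          simp
        have htkrest : (rest.takeWhile PySem.Str.strIsdigit).length = k - 1 := by
          rw [hk, hdigits, List.takeWhile_cons, if_pos hdig]
          simp
        have hdropdw : rest.dropWhile PySem.Str.strIsdigit = ln.drop (j + k) := by
          rw [pv_dropWhile_eq_drop, htkrest, ← hrest, List.drop_drop]
          congr 1
          omega
        have henum : (pvEnumFrom (j + 1) rest).drop (k - 1)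
            = pvEnumFrom (j + k) (ln.drop (j + k)) := by
          rw [pvEnumFrom_drop, ← hdropdw, pv_dropWhile_eq_drop, htkrest]
          congr 1
          omega
        rw [hstep, pv_skip ln (k - 1) _ _ _ (by simp [List.length_range']; omega), henum,
          ih (j + k) _ (by omega)]
        rw [pv_alt_cons, if_pos hdig, hdig]
        have hfun : (fun y => PySem.Str.strIsdigit y == true) = PySem.Str.strIsdigit := by
          funext y
          cases hyy : PySem.Str.strIsdigit y <;> simp
        rw [hfun, hdropdw]
        have hdig' : (x :: rest.takeWhile PySem.Str.strIsdigit) = digits := by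
          rw [hdigits, List.takeWhile_cons, if_pos hdig]
        rw [hdig', ← hk, List.append_assoc]
      · simp only [Bool.not_eq_true] at hdig
        have hdig' : PySem.Chars.strIsdigit x.toList = false := by
          rw [← PySem.Str.strIsdigit_eq]; exact hdig
        have hstep : pvStepA ln (acc, []) (j, x) = (acc ++ [x], []) := by
          simp [pvStepA, hdig']
        rw [hstep, ← hrest, ih (j + 1) _ (by omega), hrest,
          pv_alt_cons_nondigit x rest hdig, List.append_assoc]
        simp

-- ===== VERDICT (by name: the statement is the Claim_ definition above) =====
theorem condense_numbers_spec : Claim_equal_condense_numbers := by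
  intro ln _
  unfold Spec_condense_numbers condense_numbers
  have := pv_main ln ln.length 0 [] (by omega)
  simpa using this
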